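-- pv_equiv track=rewrite | github.com/INF1007-2021A/2021a-c01-ch5-exercices-Julien9969 | exercice.py | verify_ages
-- ===== SOURCE A (Python) =====
-- from typing import List
--
-- def verify_ages(groups: List[List[int]]) -> List[bool]:
--     list_accept=[]
--     for group in groups:
--         resultat = True
--         if len(group)>10 or len(group)<4:
--             list_accept.append(False)
--             continue
--
--         for individual in group:
--
--             if individual<18:
--                 resultat=False
--
--             if individual>70:
--                 for individual in group:
--                     if individual==50:
--                         resultat=False
--
--         for individual in group:
--             if individual==25:
--                 resultat=True
--
--         list_accept.append(resultat)
--
--     return list_accept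
-- ===== SOURCE B (Python) =====
-- from typing import List
--
-- def verify_ages(groups: List[List[int]]) -> List[bool]:
--     def accept(group):
--         if not (4 <= len(group) <= 10):
--             return False
--         return 25 in group or not (any(x < 18 for x in group)
--                                    or (any(x > 70 for x in group) and 50 in group))
--     return [accept(g) for g in groups]
-- ===== Notes on version B (the rewrite author's own statement) =====
-- stated objective: simpler
-- what changed: Replaces A's flag-toggling nested loops (including a quadratic inner rescan for 50 triggered by each member over 70) with a single per-group boolean formula over membership/any checks, mapped over the groups.
import Mathlib
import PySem

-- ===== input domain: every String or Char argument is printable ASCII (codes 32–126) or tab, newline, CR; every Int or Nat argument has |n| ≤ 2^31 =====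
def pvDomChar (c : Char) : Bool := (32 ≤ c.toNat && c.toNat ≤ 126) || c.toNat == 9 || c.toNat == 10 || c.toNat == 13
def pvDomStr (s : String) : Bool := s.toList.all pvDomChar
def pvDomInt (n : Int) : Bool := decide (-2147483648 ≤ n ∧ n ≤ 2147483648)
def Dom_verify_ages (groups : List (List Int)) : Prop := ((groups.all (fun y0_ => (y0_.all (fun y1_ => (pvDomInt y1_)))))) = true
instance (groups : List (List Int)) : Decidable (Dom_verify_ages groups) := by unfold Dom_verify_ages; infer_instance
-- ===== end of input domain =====

-- B replaces A's flag-toggling nested loops (with a quadratic rescan for 50) by one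
-- per-group boolean formula, mapped over the groups; objective: simpler.

-- ===== PORT A =====
-- the inner 'for individual in group: if individual==50: resultat=False' loop
def pvScan50 (group : List Int) (r : Bool) : Bool :=
  group.foldl (fun r y => if y == 50 then false else r) r

-- the first member loop of A (sets false on <18; on >70 rescans the whole group for 50)
def pvLoop1 (group : List Int) : Bool :=
  group.foldl (fun r x =>
    let r := if x < 18 then false else r
    if x > 70 then pvScan50 group r else r) true

-- the second member loop of A (sets true on 25)
def pvLoop2 (group : List Int) (r : Bool) : Bool :=
  group.foldl (fun r x => if x == 25 then true else r) r

def verify_ages (groups : List (List Int)) : List Bool :=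
  groups.foldl (fun list_accept group =>
    if group.length > 10 || group.length < 4 then list_accept ++ [false]
    else list_accept ++ [pvLoop2 group (pvLoop1 group)]) []

-- ===== PORT B =====
def pvAccept (group : List Int) : Bool :=
  if !(4 ≤ group.length && group.length ≤ 10) then false
  else group.contains 25
       || !(group.any (fun x => x < 18)
            || (group.any (fun x => x > 70) && group.contains 50))

def verify_ages_alt (groups : List (List Int)) : List Bool :=
  groups.map pvAccept

-- ===== PRECONDITION & SPEC =====
def Spec_verify_ages (groups : List (List Int)) (out : List Bool) : Prop := out = verify_ages_alt groups
instance (groups : List (List Int)) (out : List Bool) : Decidable (Spec_verify_ages groups out) := by unfold Spec_verify_ages; infer_instance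

-- ===== CLAIM (what is proved, stated in full; the proofs are below) =====
def Claim_equal_verify_ages : Prop := ∀ (groups : List (List Int)), Dom_verify_ages groups → Spec_verify_ages groups (verify_ages groups)

-- ===== LEMMAS AND PROOFS =====

lemma pvScan50_eq (group : List Int) (r : Bool) :
    pvScan50 group r = (r && !group.contains 50) := by
  unfold pvScan50
  induction group generalizing r with
  | nil => simp
  | cons a l ih =>
    simp only [List.foldl_cons, List.contains_cons, ih]
    by_cases h : a = 50
    · simp [h]
    · have h' : ((50:Int) == a) = false := by simp [Ne.symm h]
      simp [h, h']

lemma foldl_and_all (p : Int → Bool) (l : List Int) (r : Bool) :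
    l.foldl (fun r x => r && p x) r = (r && l.all p) := by
  induction l generalizing r with
  | nil => simp
  | cons a t ih => simp [ih, Bool.and_assoc]

lemma pvLoop1_eq (group : List Int) :
    pvLoop1 group
      = group.all (fun x => !decide (x < 18) && (!decide (x > 70) || !group.contains 50)) := by
  unfold pvLoop1
  have hf : (fun (r : Bool) (x : Int) =>
        let r := if x < 18 then false else r
        if x > 70 then pvScan50 group r else r)
      = fun r x => r && (!decide (x < 18) && (!decide (x > 70) || !group.contains 50)) := by
    funext r x
    simp only [pvScan50_eq]
    by_cases h18 : x < 18 <;> by_cases h70 : x > 70 <;>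
      cases hc : group.contains 50 <;> cases r <;> simp [h18, h70]
  rw [hf, foldl_and_all]
  simp

lemma pvLoop2_eq (group : List Int) (r : Bool) :
    pvLoop2 group r = (r || group.contains 25) := by
  unfold pvLoop2
  induction group generalizing r with
  | nil => simp
  | cons a l ih =>
    simp only [List.foldl_cons, List.contains_cons, ih]
    by_cases h : a = 25
    · simp [h]
    · have h' : ((25:Int) == a) = false := by simp [Ne.symm h]
      simp [h, h']

-- any over a disjunction splits (specific shape used by pvAccept's formula)
lemma any_or_split (l : List Int) (p q : Int → Bool) :
    l.any (fun x => p x || q x) = (l.any p || l.any q) := by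
  induction l with
  | nil => simp
  | cons a t ih => simp only [List.any_cons, ih]; cases p a <;> cases q a <;> simp

lemma pvGroup_eq (group : List Int) :
    (if group.length > 10 || group.length < 4 then false
     else pvLoop2 group (pvLoop1 group)) = pvAccept group := by
  unfold pvAccept
  by_cases hlen : group.length > 10 ∨ group.length < 4
  · have hb : (decide (group.length > 10) || decide (group.length < 4)) = true := by
      rcases hlen with h | h <;> simp [h]
    have hb' : (!(decide (4 ≤ group.length) && decide (group.length ≤ 10))) = true := by
      rcases hlen with h | h <;> simp <;> omega
    rw [hb, hb']
    simp
  · rw [not_or] at hlen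
    simp only [not_lt] at hlen
    obtain ⟨h1, h2⟩ := hlen
    have hb : (decide (group.length > 10) || decide (group.length < 4)) = false := by
      simp; omega
    have hb' : (!(decide (4 ≤ group.length) && decide (group.length ≤ 10))) = false := by
      simp; omega
    rw [hb', hb]
    simp only [if_false, Bool.false_eq_true]
    rw [pvLoop2_eq, pvLoop1_eq]
    cases hc : group.contains 50 <;>
      cases h25 : group.contains 25 <;>
        simp [List.all_eq_not_any_not, Bool.or_comm, any_or_split]

lemma verify_ages_fold (groups : List (List Int)) (acc : List Bool) :
    groups.foldl (fun list_accept group =>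
      if group.length > 10 || group.length < 4 then list_accept ++ [false]
      else list_accept ++ [pvLoop2 group (pvLoop1 group)]) acc
    = acc ++ groups.map pvAccept := by
  induction groups generalizing acc with
  | nil => simp
  | cons g t ih =>
    simp only [List.foldl_cons, List.map_cons]
    rw [show (if g.length > 10 || g.length < 4 then acc ++ [false]
              else acc ++ [pvLoop2 g (pvLoop1 g)])
          = acc ++ [pvAccept g] by
        rw [← pvGroup_eq g]; split <;> rfl]
    rw [ih]; simp

-- ===== VERDICT (by name: the statement is the Claim_ definition above) =====
theorem verify_ages_spec : Claim_equal_verify_ages := by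
  intro groups _
  unfold Spec_verify_ages verify_ages verify_ages_alt
  simpa using verify_ages_fold groups []
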